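-- pv_equiv track=rewrite | github.com/gyoforit/study-algorithm | programmers/lv2_더맵게.py | solution
-- ===== SOURCE A (Python) =====
-- import heapq
--
-- def solution(scoville, K):
--     answer = 0
--     heapq.heapify(scoville)
--     while (len(scoville) >=2) & (scoville[0] < K):
--         first = heapq.heappop(scoville)
--         second = heapq.heappop(scoville)
--         tmp = first + (second*2)
--         heapq.heappush(scoville, tmp)
--         answer += 1
--     return answer if scoville[0] >= K else -1
-- ===== SOURCE B (Python) =====
-- def solution(scoville, K):
--     # Return-value equivalent to the heapq version; works on a copy instead of
--     # mutating the argument in place, and finds minima by linear scans.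
--     s = list(scoville)
--     answer = 0
--     while len(s) >= 2 and min(s) < K:
--         first = s.pop(s.index(min(s)))
--         second = s.pop(s.index(min(s)))
--         s.append(first + 2 * second)
--         answer += 1
--     return answer if min(s) >= K else -1
-- ===== Notes on version B (the rewrite author's own statement) =====
-- stated objective: simpler
-- what changed: Replaces the binary heap (heapq heapify/siftup/siftdown) by a plain list from which each round's two smallest elements are removed via linear min-scans (min + index + pop), trading O(n log n) for O(n^2); only the return value is matched (A heapifies its argument in place, B works on a copy).
import Mathlib
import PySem

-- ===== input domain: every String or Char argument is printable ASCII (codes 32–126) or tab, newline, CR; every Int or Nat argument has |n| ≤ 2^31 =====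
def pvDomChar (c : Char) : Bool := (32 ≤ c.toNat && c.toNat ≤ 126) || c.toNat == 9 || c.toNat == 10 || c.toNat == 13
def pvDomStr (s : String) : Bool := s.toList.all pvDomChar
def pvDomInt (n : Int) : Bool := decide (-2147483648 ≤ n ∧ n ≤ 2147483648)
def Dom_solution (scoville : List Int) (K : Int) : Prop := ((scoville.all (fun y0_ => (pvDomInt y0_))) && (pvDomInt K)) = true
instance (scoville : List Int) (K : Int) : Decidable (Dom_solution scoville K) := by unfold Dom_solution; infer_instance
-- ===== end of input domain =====

-- B replaces the heapq binary heap by repeated linear min-scans on a plain list (simpler, no heap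
-- invariant); equivalence is about the RETURN value only: A heapifies its argument in place, B copies.


-- ===== PORT A =====
-- heapq is a C library; its documented pure-Python reference algorithms
-- (_siftdown, _siftup, heapify, heappush, heappop) are transliterated here step for step.

-- CPython _siftdown(heap, startpos, pos) bubble-up loop; newitem is passed explicitly
-- (Python reads it once from heap[pos] before the loop); heap[pos] = parent / heap[pos] = newitem
-- are List.set, parentpos = (pos - 1) >> 1 is (pos - 1) / 2.
def siftdownLoop (heap : List Int) (startpos pos : Nat) (newitem : Int) : List Int :=
  if _h : startpos < pos then
    if newitem < heap.getD ((pos - 1) / 2) 0 then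
      siftdownLoop (heap.set pos (heap.getD ((pos - 1) / 2) 0)) startpos ((pos - 1) / 2) newitem
    else heap.set pos newitem
  else heap.set pos newitem
termination_by pos
decreasing_by
  exact Nat.lt_of_le_of_lt (Nat.div_le_self (pos - 1) 2)
    (Nat.sub_lt (Nat.lt_of_le_of_lt (Nat.zero_le startpos) _h) Nat.one_pos)

-- CPython _siftup's childpos computation: childpos = 2*pos+1, bumped to rightpos = childpos+1
-- when rightpos < endpos and not heap[childpos] < heap[rightpos].
def childSel (heap : List Int) (pos endpos : Nat) : Nat :=
  if 2 * pos + 2 < endpos ∧ ¬ heap.getD (2 * pos + 1) 0 < heap.getD (2 * pos + 2) 0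
  then 2 * pos + 2 else 2 * pos + 1

-- childSel bounds (cited by siftupLoop's decreasing_by)
theorem childSel_gt (heap : List Int) (pos endpos : Nat) : pos < childSel heap pos endpos := by
  unfold childSel
  split
  · exact Nat.lt_succ_of_lt (Nat.lt_succ_of_le (Nat.le.intro (two_mul pos).symm))
  · exact Nat.lt_succ_of_le (Nat.le.intro (two_mul pos).symm)


-- CPython _siftup's first loop: sink the hole at pos to a leaf following the smaller child,
-- then place newitem; returns the final heap and final pos.
def siftupLoop (heap : List Int) (pos endpos : Nat) (newitem : Int) : List Int × Nat :=
  if _h : 2 * pos + 1 < endpos then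
    siftupLoop (heap.set pos (heap.getD (childSel heap pos endpos) 0)) (childSel heap pos endpos)
      endpos newitem
  else (heap.set pos newitem, pos)
termination_by endpos - pos
decreasing_by
  exact Nat.sub_lt_sub_left
    (Nat.lt_of_le_of_lt
      (Nat.le_trans (Nat.le.intro (two_mul pos).symm) (Nat.le_add_right (2 * pos) 1)) _h)
    (childSel_gt heap pos endpos)

-- length facts (cited by loopA's decreasing_by)
theorem siftdownLoop_length (heap : List Int) (startpos pos : Nat) (newitem : Int) :
    (siftdownLoop heap startpos pos newitem).length = heap.length := by
  fun_induction siftdownLoop <;> simp_all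

theorem siftupLoop_length (heap : List Int) (pos endpos : Nat) (newitem : Int) :
    (siftupLoop heap pos endpos newitem).1.length = heap.length := by
  fun_induction siftupLoop <;> simp_all

-- CPython _siftup(heap, pos): sink to a leaf, place newitem, then _siftdown(heap, pos, final pos)
-- (which re-reads newitem = heap[final pos], the newitem just placed).
def siftupA (heap : List Int) (pos : Nat) : List Int :=
  siftdownLoop (siftupLoop heap pos heap.length (heap.getD pos 0)).1 pos
    (siftupLoop heap pos heap.length (heap.getD pos 0)).2 (heap.getD pos 0)

theorem siftupA_length (heap : List Int) (pos : Nat) :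
    (siftupA heap pos).length = heap.length := by
  simp [siftupA, siftdownLoop_length, siftupLoop_length]

-- heapq.heapify: for i in reversed(range(n//2)): _siftup(x, i)
def heapifyA (x : List Int) : List Int :=
  (List.range (x.length / 2)).reverse.foldl (fun h i => siftupA h i) x

-- heapq.heappush: append, then _siftdown(heap, 0, len(heap)-1)
def heappushA (heap : List Int) (item : Int) : List Int :=
  siftdownLoop (heap ++ [item]) 0 ((heap ++ [item]).length - 1) item

-- heapq.heappop: lastelt = heap.pop() (raises on empty — excluded by Pre_); if heap:
-- returnitem = heap[0]; heap[0] = lastelt; _siftup(heap, 0); else return lastelt.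
def heappopA (heap : List Int) : Int × List Int :=
  if heap.dropLast.isEmpty then (heap.getLast?.getD 0, heap.dropLast)
  else (heap.dropLast.getD 0 0, siftupA (heap.dropLast.set 0 (heap.getLast?.getD 0)) 0)

theorem heappopA_length (heap : List Int) :
    (heappopA heap).2.length = heap.length - 1 := by
  simp only [heappopA]
  split <;> simp [siftupA_length]

theorem heappushA_length (heap : List Int) (item : Int) :
    (heappushA heap item).length = heap.length + 1 := by
  simp [heappushA, siftdownLoop_length]

-- A's while loop; Python's `(len >= 2) & (heap[0] < K)` evaluates heap[0] even when len < 2,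
-- raising only on the empty list (excluded by Pre_); getD 0 is the total rendering of heap[0].
def loopA (heap : List Int) (K : Int) (answer : Int) : Int × List Int :=
  if _h : 2 ≤ heap.length ∧ heap.getD 0 0 < K then
    loopA (heappushA (heappopA (heappopA heap).2).2
      ((heappopA heap).1 + (heappopA (heappopA heap).2).1 * 2)) K (answer + 1)
  else (answer, heap)
termination_by heap.length
decreasing_by
  · rw [heappushA_length, heappopA_length, heappopA_length]
    have hp : 0 < heap.length - 1 := Nat.sub_pos_of_lt _h.1
    rw [Nat.sub_add_cancel hp]
    exact Nat.sub_lt (Nat.lt_of_lt_of_le Nat.zero_lt_two _h.1) Nat.one_pos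

def solution (scoville : List Int) (K : Int) : Int :=
  if (loopA (heapifyA scoville) K 0).2.getD 0 0 ≥ K then (loopA (heapifyA scoville) K 0).1 else -1

-- ===== PORT B =====
-- min(s) (raises on empty — excluded by Pre_; getD 0 is the total rendering)
def minB (s : List Int) : Int := (PySem.List.min? s (fun x => x)).getD 0

-- s.pop(s.index(min(s))): the none branches are unreachable for nonempty s (totality guards only)
def popMinB (s : List Int) : Int × List Int :=
  match PySem.List.index? s (minB s) with
  | some i =>
    match PySem.List.pop? s (Int.ofNat i) with
    | some r => r
    | none => (minB s, s)
  | none => (minB s, s)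

-- length fact (cited by loopB's decreasing_by)
theorem popMinB_length (s : List Int) (hs : s ≠ []) :
    (popMinB s).2.length = s.length - 1 := by
  obtain ⟨m, hm⟩ : ∃ m, PySem.List.min? s (fun x => x) = some m := by
    cases h : PySem.List.min? s (fun x => x) with
    | none => exact absurd ((PySem.List.min?_eq_none_iff s _).mp h) hs
    | some m => exact ⟨m, rfl⟩
  have hmB : minB s = m := by simp [minB, hm]
  have hmem : m ∈ s := PySem.List.min?_mem hm
  obtain ⟨k, hk⟩ : ∃ k, PySem.List.index? s m = some k := by
    have := (PySem.List.index?_isSome_iff s m).mpr hmem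
    cases h : PySem.List.index? s m with
    | none => rw [h] at this; simp at this
    | some k => exact ⟨k, rfl⟩
  obtain ⟨hklt, -, -⟩ := PySem.List.getElem_of_index?_eq_some hk
  simp only [popMinB, hmB, hk, Int.ofNat_eq_natCast, PySem.List.pop?_natCast s k hklt]
  simp [List.length_eraseIdx, hklt]

def loopB (s : List Int) (K : Int) (answer : Int) : Int × List Int :=
  if _h : 2 ≤ s.length ∧ minB s < K then
    loopB ((popMinB (popMinB s).2).2 ++ [(popMinB s).1 + 2 * (popMinB (popMinB s).2).1]) K
      (answer + 1)
  else (answer, s)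
termination_by s.length
decreasing_by
  · have h1 : s ≠ [] :=
      List.ne_nil_of_length_pos (Nat.lt_of_lt_of_le Nat.zero_lt_two _h.1)
    have ha := popMinB_length s h1
    have h2 : (popMinB s).2 ≠ [] :=
      List.ne_nil_of_length_pos (ha ▸ Nat.sub_pos_of_lt _h.1)
    have hb := popMinB_length (popMinB s).2 h2
    rw [List.length_append, List.length_cons, List.length_nil, Nat.zero_add, hb, ha]
    have hp : 0 < s.length - 1 := Nat.sub_pos_of_lt _h.1
    rw [Nat.sub_add_cancel hp]
    exact Nat.sub_lt (Nat.lt_of_lt_of_le Nat.zero_lt_two _h.1) Nat.one_pos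

def solution_alt (scoville : List Int) (K : Int) : Int :=
  if minB (loopB scoville K 0).2 ≥ K then (loopB scoville K 0).1 else -1

-- ===== PRECONDITION & SPEC =====
-- A raises (IndexError) exactly on the empty list (its loop condition already indexes scoville[0]).
def Pre_solution (scoville : List Int) (K : Int) : Prop := scoville ≠ []
instance (scoville : List Int) (K : Int) : Decidable (Pre_solution scoville K) := by
  unfold Pre_solution; infer_instance
def pvWitness_solution : List Int × Int := ([1, 2, 3, 9, 10, 12], 7)

def Spec_solution (scoville : List Int) (K : Int) (out : Int) : Prop := out = solution_alt scoville K
instance (scoville : List Int) (K : Int) (out : Int) : Decidable (Spec_solution scoville K out) := by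
  unfold Spec_solution; infer_instance

-- ===== CLAIM (what is proved, stated in full; the proofs are below) =====
def Claim_equal_solution : Prop := ∀ (scoville : List Int) (K : Int), Dom_solution scoville K → Pre_solution scoville K → Spec_solution scoville K (solution scoville K)

-- ===== LEMMAS AND PROOFS =====

theorem childSel_lt (heap : List Int) (pos endpos : Nat) (h : 2 * pos + 1 < endpos) :
    childSel heap pos endpos < endpos := by
  unfold childSel
  split
  case isTrue hc => exact hc.1
  case isFalse hc => exact h

-- getD plumbing
theorem getD_set_self (h : List Int) (i : Nat) (a : Int) (hi : i < h.length) :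
    (h.set i a).getD i 0 = a := by
  simp [List.getD_eq_getElem?_getD, List.getElem?_set_self hi]

theorem getD_set_ne (h : List Int) (i j : Nat) (a : Int) (hne : i ≠ j) :
    (h.set i a).getD j 0 = h.getD j 0 := by
  simp [List.getD_eq_getElem?_getD, List.getElem?_set_ne hne]

theorem getD_eq_getElem (h : List Int) (j : Nat) (hj : j < h.length) :
    h.getD j 0 = h[j] := by
  simp [List.getD_eq_getElem?_getD, List.getElem?_eq_getElem hj]

theorem getD_mem (h : List Int) (j : Nat) (hj : j < h.length) : h.getD j 0 ∈ h := by
  rw [getD_eq_getElem h j hj]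
  exact List.getElem_mem hj

theorem getD_append_left (h t : List Int) (j : Nat) (hj : j < h.length) :
    (h ++ t).getD j 0 = h.getD j 0 := by
  simp [List.getD_eq_getElem?_getD, List.getElem?_append_left hj]

theorem getD_dropLast (h : List Int) (j : Nat) (hj : j < h.length - 1) :
    h.dropLast.getD j 0 = h.getD j 0 := by
  rw [List.dropLast_eq_take]
  simp only [List.getD_eq_getElem?_getD, List.getElem?_take]
  rw [if_pos hj]

theorem getD_zero_head (h : List Int) (hne : h ≠ []) : h.getD 0 0 = h.head hne := by
  cases h with
  | nil => exact absurd rfl hne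
  | cons a t => rfl

theorem set_getD_self (h : List Int) (i : Nat) (hi : i < h.length) :
    h.set i (h.getD i 0) = h := by
  apply List.ext_getElem (by simp)
  intro j h1 h2
  by_cases hij : i = j
  · subst hij
    rw [List.getElem_set_self h1, getD_eq_getElem h i hi]
  · exact List.getElem_set_ne hij h1

-- permutation plumbing
theorem cons_eraseIdx_perm (s : List Int) (k : Nat) (hk : k < s.length) :
    (s[k] :: s.eraseIdx k).Perm s := by
  induction s generalizing k with
  | nil => simp at hk
  | cons a t ih =>
    cases k with
    | zero => simp
    | succ k =>
      have hk' : k < t.length := by simpa using hk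
      simp only [List.getElem_cons_succ, List.eraseIdx_cons_succ]
      exact (List.Perm.swap a (t[k]'hk') _).trans ((ih k hk').cons a)

theorem set_perm (h : List Int) (i : Nat) (a : Int) (hi : i < h.length) :
    (h.set i a).Perm (a :: h.eraseIdx i) := by
  induction h generalizing i with
  | nil => simp at hi
  | cons b t ih =>
    cases i with
    | zero => simp
    | succ i =>
      simp only [List.set_cons_succ, List.eraseIdx_cons_succ]
      exact ((ih i (by simpa using hi)).cons b).trans (List.Perm.swap a b _)

theorem count_set (h : List Int) (i : Nat) (hi : i < h.length) (a x : Int) :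
    List.count x (h.set i a) + (if h.getD i 0 = x then 1 else 0)
      = List.count x h + (if a = x then 1 else 0) := by
  induction h generalizing i with
  | nil => simp at hi
  | cons b t ih =>
    cases i with
    | zero =>
      simp only [List.set_cons_zero, List.count_cons, List.getD_cons_zero, beq_iff_eq]
      split_ifs <;> omega
    | succ i =>
      simp only [List.set_cons_succ, List.count_cons, List.getD_cons_succ, beq_iff_eq]
      have := ih i (by simpa using hi)
      split_ifs at this ⊢ <;> omega

theorem set_set_perm (h : List Int) (i j : Nat) (a : Int) (hi : i < h.length)
    (hj : j < h.length) (hne : i ≠ j) :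
    ((h.set i (h.getD j 0)).set j a).Perm (h.set i a) := by
  rw [List.perm_iff_count]
  intro x
  have hj' : j < (h.set i (h.getD j 0)).length := by simpa using hj
  have h1 := count_set (h.set i (h.getD j 0)) j hj' a x
  have h2 := count_set h i hi (h.getD j 0) x
  have h3 := count_set h i hi a x
  rw [getD_set_ne h i j _ hne] at h1
  split_ifs at h1 h2 h3 <;> omega

-- ancestor relation along the parent chain (used to track the climb of _siftdown)
def descB (s j : Nat) : Bool :=
  if j ≤ s then j == s else descB s ((j - 1) / 2)
termination_by j
decreasing_by omega

theorem descB_le (s j : Nat) (h : descB s j = true) : s ≤ j := by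
  fun_induction descB with
  | case1 j hle => simp at h; omega
  | case2 j hle ih => exact le_trans (ih h) (by omega)

theorem descB_self (s : Nat) : descB s s = true := by
  unfold descB
  simp

theorem descB_zero (j : Nat) : descB 0 j = true := by
  fun_induction descB with
  | case1 j hle => simp; omega
  | case2 j hle ih => exact ih

theorem descB_parent (s j : Nat) (hj : descB s j = true) (hlt : s < j) :
    descB s ((j - 1) / 2) = true := by
  unfold descB at hj
  rwa [if_neg (by omega)] at hj

theorem descB_child (s p c : Nat) (hp : descB s p = true) (hc : (c - 1) / 2 = p)
    (h0 : 0 < c) : descB s c = true := by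
  have := descB_le s p hp
  unfold descB
  rw [if_neg (by omega), hc]
  exact hp

-- heap-shape invariants: HP s h = every parent/child pair with parent index ≥ s is ordered
def HP (s : Nat) (h : List Int) : Prop :=
  ∀ j, 0 < j → j < h.length → s ≤ (j - 1) / 2 → h.getD ((j - 1) / 2) 0 ≤ h.getD j 0

-- HP s, except pairs incident to the hole at pos
def ExceptAt (s : Nat) (h : List Int) (pos : Nat) : Prop :=
  ∀ j, 0 < j → j < h.length → s ≤ (j - 1) / 2 → j ≠ pos → (j - 1) / 2 ≠ pos →
    h.getD ((j - 1) / 2) 0 ≤ h.getD j 0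

-- v is below both children of the hole
def ChildFact (h : List Int) (pos : Nat) (v : Int) : Prop :=
  ∀ j, 0 < j → j < h.length → (j - 1) / 2 = pos → v ≤ h.getD j 0

-- the hole's parent is below both children of the hole
def HoleFact (s : Nat) (h : List Int) (pos : Nat) : Prop :=
  0 < pos → s ≤ (pos - 1) / 2 →
    ∀ j, 0 < j → j < h.length → (j - 1) / 2 = pos → h.getD ((pos - 1) / 2) 0 ≤ h.getD j 0

theorem siftdownLoop_perm (s : Nat) (n : Int) :
    ∀ pos heap, pos < heap.length → (siftdownLoop heap s pos n).Perm (heap.set pos n) := by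
  intro pos
  induction pos using Nat.strong_induction_on with
  | _ pos IH =>
    intro heap hlt
    unfold siftdownLoop
    split
    · split
      · have hpplt : (pos - 1) / 2 < heap.length := by omega
        exact ((IH ((pos - 1) / 2) (by omega) _ (by simpa using hpplt)).trans
          (set_set_perm heap pos ((pos - 1) / 2) n hlt hpplt (by omega)))
      · exact List.Perm.refl _
    · exact List.Perm.refl _

theorem siftdownLoop_HP (s : Nat) (n : Int) :
    ∀ pos heap, pos < heap.length → descB s pos = true → ExceptAt s heap pos →
      ChildFact heap pos n → HoleFact s heap pos → HP s (siftdownLoop heap s pos n) := by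
  intro pos
  induction pos using Nat.strong_induction_on with
  | _ pos IH =>
    intro heap hlt hd hE hC hH
    unfold siftdownLoop
    split
    case isTrue hsp =>
      split
      case isTrue hcmp =>
        -- climb one level: hole moves to pp := (pos-1)/2
        have h0pos : 0 < pos := by omega
        have hdpp : descB s ((pos - 1) / 2) = true := descB_parent s pos hd hsp
        have hspp : s ≤ (pos - 1) / 2 := descB_le _ _ hdpp
        have hpplt : (pos - 1) / 2 < heap.length := by omega
        apply IH ((pos - 1) / 2) (by omega) _ (by simpa using hpplt) hdpp
        · -- ExceptAt
          intro j hj0 hjlen hsj hjne hpjne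
          rw [List.length_set] at hjlen
          by_cases hjpos : j = pos
          · exact absurd (hjpos ▸ rfl) hpjne
          · by_cases hpj : (j - 1) / 2 = pos
            · rw [hpj, getD_set_self heap pos _ hlt,
                getD_set_ne heap pos j _ (fun h => hjpos h.symm)]
              exact hH h0pos hspp j hj0 hjlen hpj
            · rw [getD_set_ne heap pos _ _ (fun h => hpj h.symm),
                getD_set_ne heap pos j _ (fun h => hjpos h.symm)]
              exact hE j hj0 hjlen hsj hjpos hpj
        · -- ChildFact
          intro j hj0 hjlen hpj
          rw [List.length_set] at hjlen
          by_cases hjpos : j = pos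
          · subst hjpos
            rw [getD_set_self heap j _ hlt]
            exact le_of_lt hcmp
          · rw [getD_set_ne heap pos j _ (fun h => hjpos h.symm)]
            have := hE j hj0 hjlen (by omega) hjpos (by omega)
            rw [hpj] at this
            exact le_trans (le_of_lt hcmp) this
        · -- HoleFact
          intro h0pp hsppp j hj0 hjlen hpj
          rw [List.length_set] at hjlen
          have hppp : pos ≠ ((pos - 1) / 2 - 1) / 2 := by omega
          rw [getD_set_ne heap pos _ _ hppp]
          have e1 : heap.getD (((pos - 1) / 2 - 1) / 2) 0 ≤ heap.getD ((pos - 1) / 2) 0 :=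
            hE ((pos - 1) / 2) h0pp hpplt hsppp (by omega) (fun h => hppp h.symm)
          by_cases hjpos : j = pos
          · subst hjpos
            rw [getD_set_self heap j _ hlt]
            exact e1
          · rw [getD_set_ne heap pos j _ (fun h => hjpos h.symm)]
            have e2 : heap.getD ((j - 1) / 2) 0 ≤ heap.getD j 0 :=
              hE j hj0 hjlen (by omega) hjpos (by omega)
            rw [hpj] at e2
            exact le_trans e1 e2
      case isFalse hcmp =>
        -- place newitem at pos
        intro j hj0 hjlen hsj
        rw [List.length_set] at hjlen
        by_cases hjpos : j = pos
        · subst hjpos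
          rw [getD_set_self heap j _ hlt, getD_set_ne heap j _ _ (by omega)]
          omega
        · by_cases hpj : (j - 1) / 2 = pos
          · rw [hpj, getD_set_self heap pos _ hlt,
              getD_set_ne heap pos j _ (fun h => hjpos h.symm)]
            exact hC j hj0 hjlen hpj
          · rw [getD_set_ne heap pos _ _ (fun h => hpj h.symm),
              getD_set_ne heap pos j _ (fun h => hjpos h.symm)]
            exact hE j hj0 hjlen hsj hjpos hpj
    case isFalse hsp =>
      have hpos_eq : pos = s := by
        have := descB_le s pos hd
        omega
      intro j hj0 hjlen hsj
      rw [List.length_set] at hjlen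
      by_cases hjpos : j = pos
      · subst hjpos
        omega
      · by_cases hpj : (j - 1) / 2 = pos
        · rw [hpj, getD_set_self heap pos _ hlt,
            getD_set_ne heap pos j _ (fun h => hjpos h.symm)]
          exact hC j hj0 hjlen hpj
        · rw [getD_set_ne heap pos _ _ (fun h => hpj h.symm),
            getD_set_ne heap pos j _ (fun h => hjpos h.symm)]
          exact hE j hj0 hjlen hsj hjpos hpj

-- childSel basic facts
theorem childSel_parent (heap : List Int) (pos endpos : Nat) :
    (childSel heap pos endpos - 1) / 2 = pos := by
  unfold childSel
  split <;> omega

theorem childSel_le_sibling (heap : List Int) (pos endpos : Nat) (j : Nat) (hj0 : 0 < j)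
    (hpj : (j - 1) / 2 = pos) (hjlt : j < endpos) (hjne : j ≠ childSel heap pos endpos) :
    heap.getD (childSel heap pos endpos) 0 ≤ heap.getD j 0 := by
  by_cases hcond : 2 * pos + 2 < endpos ∧ ¬ heap.getD (2 * pos + 1) 0 < heap.getD (2 * pos + 2) 0
  · have hc : childSel heap pos endpos = 2 * pos + 2 := by unfold childSel; rw [if_pos hcond]
    rw [hc] at hjne ⊢
    have hj : j = 2 * pos + 1 := by omega
    subst hj
    have := hcond.2
    omega
  · have hc : childSel heap pos endpos = 2 * pos + 1 := by unfold childSel; rw [if_neg hcond]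
    rw [hc] at hjne ⊢
    have hj : j = 2 * pos + 2 := by omega
    subst hj
    rw [Classical.not_and_iff_not_or_not, not_not] at hcond
    rcases hcond with h | h
    · omega
    · omega

theorem siftupLoop_perm (n : Int) :
    ∀ k pos heap endpos, endpos ≤ heap.length → endpos - pos ≤ k → pos < endpos →
      ((siftupLoop heap pos endpos n).1).Perm (heap.set pos n) := by
  intro k
  induction k with
  | zero => intro pos heap endpos _ h1 h2; omega
  | succ k IH =>
    intro pos heap endpos hend hk hpos
    unfold siftupLoop
    split
    case isTrue h21 =>
      have hcgt := childSel_gt heap pos endpos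
      have hclt := childSel_lt heap pos endpos h21
      have hperm := IH (childSel heap pos endpos) (heap.set pos (heap.getD (childSel heap pos endpos) 0))
        endpos (by simpa using hend) (by omega) hclt
      exact hperm.trans (set_set_perm heap pos (childSel heap pos endpos) n (by omega)
        (by omega) (by omega))
    case isFalse h21 => exact List.Perm.refl _

theorem siftupLoop_snd_lt (n : Int) :
    ∀ k pos heap endpos, endpos - pos ≤ k → pos < endpos →
      (siftupLoop heap pos endpos n).2 < endpos := by
  intro k
  induction k with
  | zero => intro pos heap endpos h1 h2; omega
  | succ k IH =>
    intro pos heap endpos hk hpos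
    unfold siftupLoop
    split
    case isTrue h21 =>
      have hcgt := childSel_gt heap pos endpos
      have hclt := childSel_lt heap pos endpos h21
      exact IH (childSel heap pos endpos) _ endpos (by omega) hclt
    case isFalse h21 => exact hpos

theorem siftupLoop_set_id (n : Int) :
    ∀ k pos heap endpos, endpos - pos ≤ k →
      (siftupLoop heap pos endpos n).1.set (siftupLoop heap pos endpos n).2 n
        = (siftupLoop heap pos endpos n).1 := by
  intro k
  induction k with
  | zero =>
    intro pos heap endpos h1
    unfold siftupLoop
    split
    · omega
    · exact List.set_set n
  | succ k IH =>
    intro pos heap endpos hk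
    unfold siftupLoop
    split
    case isTrue h21 =>
      have hcgt := childSel_gt heap pos endpos
      exact IH (childSel heap pos endpos) _ endpos (by omega)
    case isFalse h21 => exact List.set_set n

theorem siftupLoop_HP (n : Int) (s : Nat) :
    ∀ k pos heap endpos, endpos = heap.length → endpos - pos ≤ k → pos < endpos →
      descB s pos = true → ExceptAt s heap pos → HoleFact s heap pos →
      HP s (siftdownLoop (siftupLoop heap pos endpos n).1 s (siftupLoop heap pos endpos n).2 n) := by
  intro k
  induction k with
  | zero => intro pos heap endpos _ h1 h2; omega
  | succ k IH =>
    intro pos heap endpos hend hk hpos hd hE hH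
    have hs_le_pos : s ≤ pos := descB_le s pos hd
    unfold siftupLoop
    split
    case isTrue h21 =>
      have hcgt := childSel_gt heap pos endpos
      have hclt := childSel_lt heap pos endpos h21
      have hcp := childSel_parent heap pos endpos
      apply IH (childSel heap pos endpos) _ endpos (by simpa using hend) (by omega) hclt
        (descB_child s pos _ hd hcp (by omega))
      · -- ExceptAt around the new hole
        intro j hj0 hjlen hsj hjne hpjne
        rw [List.length_set] at hjlen
        by_cases hjpos : j = pos
        · subst hjpos
          have hne1 : j ≠ (j - 1) / 2 := by omega
          rw [getD_set_self heap j _ (by omega),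
            getD_set_ne heap j _ _ hne1]
          exact hH hj0 hsj (childSel heap j endpos) (by omega) (by omega) hcp
        · by_cases hpj : (j - 1) / 2 = pos
          · rw [hpj, getD_set_self heap pos _ (by omega),
              getD_set_ne heap pos j _ (fun h => hjpos h.symm)]
            exact childSel_le_sibling heap pos endpos j hj0 hpj (by omega) hjne
          · rw [getD_set_ne heap pos _ _ (fun h => hpj h.symm),
              getD_set_ne heap pos j _ (fun h => hjpos h.symm)]
            exact hE j hj0 hjlen hsj hjpos hpj
      · -- HoleFact around the new hole
        intro h0c hsc j hj0 hjlen hpj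
        rw [List.length_set] at hjlen
        rw [hcp]
        have hjgt : childSel heap pos endpos < j := by omega
        rw [getD_set_self heap pos _ (by omega),
          getD_set_ne heap pos j _ (by omega)]
        have := hE j hj0 hjlen (by omega) (by omega) (by omega)
        rw [hpj] at this
        exact this
    case isFalse h21 =>
      apply siftdownLoop_HP s n pos (heap.set pos n) (by simp; omega) hd
      · intro j hj0 hjlen hsj hjne hpjne
        rw [List.length_set] at hjlen
        rw [getD_set_ne heap pos _ _ (fun h => hpjne h.symm),
          getD_set_ne heap pos j _ (fun h => hjne h.symm)]
        exact hE j hj0 hjlen hsj hjne hpjne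
      · intro j hj0 hjlen hpj
        rw [List.length_set] at hjlen
        omega
      · intro _ _ j hj0 hjlen hpj
        rw [List.length_set] at hjlen
        omega

theorem siftupA_HP (heap : List Int) (pos : Nat) (hlt : pos < heap.length)
    (hE : ExceptAt pos heap pos) : HP pos (siftupA heap pos) := by
  unfold siftupA
  apply siftupLoop_HP _ pos (heap.length - pos) pos heap heap.length rfl (by omega) hlt
    (descB_self pos) hE
  intro h0 hg _ _ _ _
  omega

theorem siftupA_perm (heap : List Int) (pos : Nat) (hlt : pos < heap.length) :
    (siftupA heap pos).Perm heap := by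
  unfold siftupA
  have hlen := siftupLoop_length heap pos heap.length (heap.getD pos 0)
  have hsnd := siftupLoop_snd_lt (heap.getD pos 0) (heap.length - pos) pos heap heap.length
    (by omega) hlt
  have h1 := siftdownLoop_perm pos (heap.getD pos 0)
    (siftupLoop heap pos heap.length (heap.getD pos 0)).2
    (siftupLoop heap pos heap.length (heap.getD pos 0)).1 (by omega)
  rw [siftupLoop_set_id (heap.getD pos 0) (heap.length - pos) pos heap heap.length (by omega)] at h1
  have h2 := siftupLoop_perm (heap.getD pos 0) (heap.length - pos) pos heap heap.length
    (le_refl _) (by omega) hlt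
  rw [set_getD_self heap pos hlt] at h2
  exact h1.trans h2

-- heapify
theorem HP_of_half (x : List Int) : HP (x.length / 2) x := by
  intro j hj0 hjlen hsj
  omega

theorem ExceptAt_of_HP_succ (i : Nat) (h : List Int) (hHP : HP (i + 1) h) :
    ExceptAt i h i := by
  intro j hj0 hjlen hsj hjne hpjne
  exact hHP j hj0 hjlen (by omega)

theorem heapify_fold (i : Nat) :
    ∀ h : List Int, 2 * i ≤ h.length → HP i h →
      HP 0 ((List.range i).reverse.foldl (fun acc j => siftupA acc j) h)
      ∧ ((List.range i).reverse.foldl (fun acc j => siftupA acc j) h).Perm h := by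
  induction i with
  | zero =>
    intro h _ hHP
    exact ⟨hHP, List.Perm.refl _⟩
  | succ i ih =>
    intro h hle hHP
    rw [List.range_succ, List.reverse_append]
    simp only [List.reverse_cons, List.reverse_nil, List.nil_append, List.singleton_append,
      List.foldl_cons]
    have hi : i < h.length := by omega
    have h1 : HP i (siftupA h i) := siftupA_HP h i hi (ExceptAt_of_HP_succ i h hHP)
    have h2 := siftupA_perm h i hi
    have hlen : (siftupA h i).length = h.length := siftupA_length h i
    obtain ⟨hA, hB⟩ := ih (siftupA h i) (by omega) h1
    exact ⟨hA, hB.trans h2⟩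

theorem heapifyA_spec (x : List Int) : HP 0 (heapifyA x) ∧ (heapifyA x).Perm x := by
  unfold heapifyA
  exact heapify_fold (x.length / 2) x (by omega) (HP_of_half x)

-- heappush
theorem heappushA_spec (h : List Int) (item : Int) (hHP : HP 0 h) :
    HP 0 (heappushA h item) ∧ (heappushA h item).Perm (item :: h) := by
  have hlen : (h ++ [item]).length - 1 = h.length := by simp
  have hget : (h ++ [item]).getD h.length 0 = item := by
    simp [List.getD_eq_getElem?_getD, List.getElem?_append_right]
  constructor
  · unfold heappushA
    rw [hlen]
    apply siftdownLoop_HP 0 item h.length (h ++ [item]) (by simp) (descB_zero _)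
    · intro j hj0 hjlen hsj hjne hpjne
      rw [List.length_append, List.length_cons, List.length_nil] at hjlen
      have hjlt : j < h.length := by omega
      rw [getD_append_left h [item] j hjlt, getD_append_left h [item] _ (by omega)]
      exact hHP j hj0 hjlt (by omega)
    · intro j hj0 hjlen hpj
      rw [List.length_append, List.length_cons, List.length_nil] at hjlen
      omega
    · intro _ _ j hj0 hjlen hpj
      rw [List.length_append, List.length_cons, List.length_nil] at hjlen
      omega
  · unfold heappushA
    rw [hlen]
    have hperm := siftdownLoop_perm 0 item h.length (h ++ [item]) (by simp)
    have hset : (h ++ [item]).set h.length item = h ++ [item] := by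
      have := set_getD_self (h ++ [item]) h.length (by simp)
      rwa [hget] at this
    rw [hset] at hperm
    exact hperm.trans (List.perm_append_singleton item h)

-- heappop
theorem heappopA_spec (h : List Int) (hne : h ≠ []) (hHP : HP 0 h) :
    (heappopA h).1 = h.getD 0 0 ∧ HP 0 (heappopA h).2
    ∧ ((heappopA h).1 :: (heappopA h).2).Perm h := by
  by_cases hlen1 : h.length ≤ 1
  · have : h.length = 1 := by
      have := List.length_pos_of_ne_nil hne
      omega
    obtain ⟨a, rfl⟩ : ∃ a, h = [a] := by
      cases h with
      | nil => simp at this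
      | cons a t =>
        cases t with
        | nil => exact ⟨a, rfl⟩
        | cons b u => simp at this
    refine ⟨rfl, ?_, by simp [heappopA]⟩
    intro j hj0 hjlen hsj
    simp [heappopA] at hjlen
  · have h2le : 2 ≤ h.length := by omega
    have hdlen : h.dropLast.length = h.length - 1 := by simp
    have hdne : h.dropLast ≠ [] := by
      intro hd
      rw [hd] at hdlen
      simp at hdlen
      omega
    have hemp : h.dropLast.isEmpty = false := by
      simpa [List.isEmpty_iff] using hdne
    have hd0 : h.dropLast.getD 0 0 = h.getD 0 0 := getD_dropLast h 0 (by omega)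
    have hL : h.getLast?.getD 0 = h.getLast hne := by
      rw [List.getLast?_eq_some_getLast hne]
      rfl
    have hslen : 0 < (h.dropLast.set 0 (h.getLast?.getD 0)).length := by
      simp
      omega
    refine ⟨by simp only [heappopA, hemp, Bool.false_eq_true, if_false]; exact hd0, ?_, ?_⟩
    · -- heap property of the result
      simp only [heappopA, hemp, Bool.false_eq_true, if_false]
      have hHP0 : HP 0 (siftupA (h.dropLast.set 0 (h.getLast?.getD 0)) 0) := by
        apply siftupA_HP _ 0 hslen
        intro j hj0 hjlen hsj hjne hpjne
        rw [List.length_set, hdlen] at hjlen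
        rw [getD_set_ne _ 0 _ _ (fun hh => hpjne hh.symm),
          getD_set_ne _ 0 j _ (by omega),
          getD_dropLast h j (by omega), getD_dropLast h _ (by omega)]
        exact hHP j hj0 (by omega) (by omega)
      exact hHP0
    · -- permutation
      simp only [heappopA, hemp, Bool.false_eq_true, if_false]
      have p1 := siftupA_perm (h.dropLast.set 0 (h.getLast?.getD 0)) 0 hslen
      have p2 := set_perm h.dropLast 0 (h.getLast?.getD 0) (by omega)
      rw [List.eraseIdx_zero] at p2
      have hdecomp : h.dropLast ++ [h.getLast?.getD 0] = h := by
        rw [hL]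
        exact List.dropLast_append_getLast hne
      have hhead : h.dropLast.getD 0 0 :: h.dropLast.tail = h.dropLast := by
        rw [getD_zero_head h.dropLast hdne]
        exact List.cons_head_tail hdne
      have q1 : (h.dropLast.getD 0 0 :: siftupA (h.dropLast.set 0 (h.getLast?.getD 0)) 0).Perm
          (h.dropLast.getD 0 0 :: h.getLast?.getD 0 :: h.dropLast.tail) := (p1.trans p2).cons _
      have q2 : (h.dropLast.getD 0 0 :: h.getLast?.getD 0 :: h.dropLast.tail).Perm
          (h.getLast?.getD 0 :: h.dropLast.getD 0 0 :: h.dropLast.tail) := List.Perm.swap _ _ _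
      have q3 : (h.getLast?.getD 0 :: h.dropLast).Perm (h.dropLast ++ [h.getLast?.getD 0]) :=
        (List.perm_append_singleton _ _).symm
      rw [hdecomp] at q3
      have q4 : (h.getLast?.getD 0 :: h.dropLast.getD 0 0 :: h.dropLast.tail).Perm h := by
        rw [hhead]
        exact q3
      exact q1.trans (q2.trans q4)

-- the root of a heap is its minimum
theorem HP0_le (h : List Int) (hHP : HP 0 h) :
    ∀ j, j < h.length → h.getD 0 0 ≤ h.getD j 0 := by
  intro j
  induction j using Nat.strong_induction_on with
  | _ j IH =>
    intro hj
    rcases Nat.eq_zero_or_pos j with hz | hpos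
    · subst hz; exact le_refl _
    · exact le_trans (IH ((j - 1) / 2) (by omega) (by omega)) (hHP j hpos hj (by omega))

theorem HP0_min_mem (h : List Int) (hHP : HP 0 h) (x : Int) (hx : x ∈ h) :
    h.getD 0 0 ≤ x := by
  obtain ⟨j, hj, rfl⟩ := List.mem_iff_getElem.mp hx
  rw [← getD_eq_getElem h j hj]
  exact HP0_le h hHP j hj

-- root of A's heap = B's min, across the permutation
theorem minB_eq_root (h s : List Int) (hne : h ≠ []) (hHP : HP 0 h) (hperm : h.Perm s) :
    h.getD 0 0 = minB s := by
  have hsne : s ≠ [] := by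
    intro hs
    subst hs
    exact hne hperm.eq_nil
  obtain ⟨m, hm⟩ : ∃ m, PySem.List.min? s (fun x => x) = some m := by
    cases hmm : PySem.List.min? s (fun x => x) with
    | none => exact absurd ((PySem.List.min?_eq_none_iff s _).mp hmm) hsne
    | some m => exact ⟨m, rfl⟩
  have hmB : minB s = m := by simp [minB, hm]
  have hm_mem : m ∈ h := hperm.mem_iff.mpr (PySem.List.min?_mem hm)
  have h1 : h.getD 0 0 ≤ m := HP0_min_mem h hHP m hm_mem
  have h2 : m ≤ h.getD 0 0 := by
    have hroot : h.getD 0 0 ∈ s :=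
      hperm.subset (getD_mem h 0 (List.length_pos_of_ne_nil hne))
    exact PySem.List.min?_isMin hm _ hroot
  rw [hmB]
  omega

-- B's scan-pop returns the minimum and permutes correctly
theorem popMinB_spec (s : List Int) (hs : s ≠ []) :
    (popMinB s).1 = minB s ∧ ((popMinB s).1 :: (popMinB s).2).Perm s := by
  obtain ⟨m, hm⟩ : ∃ m, PySem.List.min? s (fun x => x) = some m := by
    cases h : PySem.List.min? s (fun x => x) with
    | none => exact absurd ((PySem.List.min?_eq_none_iff s _).mp h) hs
    | some m => exact ⟨m, rfl⟩
  have hmB : minB s = m := by simp [minB, hm]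
  have hmem : m ∈ s := PySem.List.min?_mem hm
  obtain ⟨k, hk⟩ : ∃ k, PySem.List.index? s m = some k := by
    have := (PySem.List.index?_isSome_iff s m).mpr hmem
    cases h : PySem.List.index? s m with
    | none => rw [h] at this; simp at this
    | some k => exact ⟨k, rfl⟩
  obtain ⟨hklt, hsk, -⟩ := PySem.List.getElem_of_index?_eq_some hk
  simp only [popMinB, hmB, hk, Int.ofNat_eq_natCast, PySem.List.pop?_natCast s k hklt]
  exact ⟨hsk ▸ rfl, hsk ▸ cons_eraseIdx_perm s k hklt⟩

-- loop simulation: same answer, and A's heap stays a heap permuting B's list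
theorem loop_sim (K : Int) :
    ∀ N, ∀ (hA s : List Int) (a : Int), hA.length ≤ N → hA ≠ [] → HP 0 hA → hA.Perm s →
      (loopA hA K a).1 = (loopB s K a).1 ∧ HP 0 (loopA hA K a).2 ∧ (loopA hA K a).2 ≠ []
      ∧ (loopA hA K a).2.Perm (loopB s K a).2 := by
  intro N
  induction N with
  | zero =>
    intro hA s a hle hne _ _
    exact absurd (List.length_eq_zero_iff.mp (by omega)) hne
  | succ N IH =>
    intro hA s a hle hne hHP hperm
    have hlen_eq : hA.length = s.length := hperm.length_eq
    have hsne : s ≠ [] := by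
      intro hs
      subst hs
      exact hne hperm.eq_nil
    have hmin : hA.getD 0 0 = minB s := minB_eq_root hA s hne hHP hperm
    by_cases hcond : 2 ≤ hA.length ∧ hA.getD 0 0 < K
    · -- both loops iterate
      have hcondB : 2 ≤ s.length ∧ minB s < K := by
        constructor
        · omega
        · rw [← hmin]; exact hcond.2
      rw [loopA, dif_pos hcond, loopB, dif_pos hcondB]
      -- first pops
      obtain ⟨e1, hHP1, hpm1⟩ := heappopA_spec hA hne hHP
      obtain ⟨f1, hq1⟩ := popMinB_spec s hsne
      have hv1 : (heappopA hA).1 = (popMinB s).1 := by rw [e1, f1, hmin]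
      have hperm1 : (heappopA hA).2.Perm (popMinB s).2 := by
        apply List.Perm.cons_inv (a := (heappopA hA).1)
        have hq1' : s.Perm ((heappopA hA).1 :: (popMinB s).2) := by
          rw [hv1]
          exact hq1.symm
        exact hpm1.trans (hperm.trans hq1')
      have hlen1 : (heappopA hA).2.length = hA.length - 1 := heappopA_length hA
      have hne1 : (heappopA hA).2 ≠ [] := by
        intro hh
        rw [hh] at hlen1
        simp at hlen1
        omega
      have hs1ne : (popMinB s).2 ≠ [] := by
        intro hh
        rw [hh] at hperm1
        exact hne1 hperm1.eq_nil
      -- second pops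
      obtain ⟨e2, hHP2, hpm2⟩ := heappopA_spec (heappopA hA).2 hne1 hHP1
      obtain ⟨f2, hq2⟩ := popMinB_spec (popMinB s).2 hs1ne
      have hmin2 : (heappopA hA).2.getD 0 0 = minB (popMinB s).2 :=
        minB_eq_root _ _ hne1 hHP1 hperm1
      have hv2 : (heappopA (heappopA hA).2).1 = (popMinB (popMinB s).2).1 := by
        rw [e2, f2, hmin2]
      have hperm2 : (heappopA (heappopA hA).2).2.Perm (popMinB (popMinB s).2).2 := by
        apply List.Perm.cons_inv (a := (heappopA (heappopA hA).2).1)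
        have hq2' : (popMinB s).2.Perm
            ((heappopA (heappopA hA).2).1 :: (popMinB (popMinB s).2).2) := by
          rw [hv2]
          exact hq2.symm
        exact hpm2.trans (hperm1.trans hq2')
      -- push
      obtain ⟨hHP3, hpush⟩ := heappushA_spec (heappopA (heappopA hA).2).2
        ((heappopA hA).1 + (heappopA (heappopA hA).2).1 * 2) hHP2
      have hval : (heappopA hA).1 + (heappopA (heappopA hA).2).1 * 2
          = (popMinB s).1 + 2 * (popMinB (popMinB s).2).1 := by
        rw [hv1, hv2]
        ring
      have hperm3 : (heappushA (heappopA (heappopA hA).2).2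
            ((heappopA hA).1 + (heappopA (heappopA hA).2).1 * 2)).Perm
          ((popMinB (popMinB s).2).2 ++ [(popMinB s).1 + 2 * (popMinB (popMinB s).2).1]) := by
        have step2 : (((heappopA hA).1 + (heappopA (heappopA hA).2).1 * 2)
              :: (heappopA (heappopA hA).2).2).Perm
            ((popMinB (popMinB s).2).2 ++ [(popMinB s).1 + 2 * (popMinB (popMinB s).2).1]) := by
          rw [hval]
          exact (hperm2.cons _).trans (List.perm_append_singleton _ _).symm
        exact hpush.trans step2
      have hlen2 : (heappopA (heappopA hA).2).2.length = hA.length - 2 := by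
        rw [heappopA_length, hlen1]
        omega
      have hlen3 : (heappushA (heappopA (heappopA hA).2).2
          ((heappopA hA).1 + (heappopA (heappopA hA).2).1 * 2)).length = hA.length - 1 := by
        rw [heappushA_length, hlen2]
        omega
      have hne3 : (heappushA (heappopA (heappopA hA).2).2
          ((heappopA hA).1 + (heappopA (heappopA hA).2).1 * 2)) ≠ [] := by
        intro hh
        rw [hh] at hlen3
        simp at hlen3
        omega
      exact IH _ _ (a + 1) (by omega) hne3 hHP3 hperm3
    · -- both loops stop
      have hcondB : ¬ (2 ≤ s.length ∧ minB s < K) := by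
        rw [← hlen_eq, ← hmin]
        exact hcond
      rw [loopA, dif_neg hcond, loopB, dif_neg hcondB]
      exact ⟨rfl, hHP, hne, hperm⟩

-- ===== VERDICT (by name: the statement is the Claim_ definition above) =====
theorem solution_spec : Claim_equal_solution := by
  unfold Claim_equal_solution
  intro scoville K _hdom hpre
  unfold Spec_solution solution solution_alt
  obtain ⟨hHP, hperm⟩ := heapifyA_spec scoville
  have hne : heapifyA scoville ≠ [] := by
    intro hh
    rw [hh] at hperm
    exact hpre hperm.symm.eq_nil
  obtain ⟨h1, h2, h3, h4⟩ := loop_sim K (heapifyA scoville).length (heapifyA scoville) scoville 0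
    (le_refl _) hne hHP hperm
  have hmin := minB_eq_root _ _ h3 h2 h4
  rw [h1, hmin]
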